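-- pv_equiv track=rewrite | github.com/legalArgMining/NAACL-HLT-submission | Codebase_notebooks_ArgGraph_NAACL-HLT/Argument component/baseline/Classifiers/feature_extraction.py | check_rebuttal_indicators
-- ===== SOURCE A (Python) =====
-- def check_rebuttal_indicators(text):
--     indicators = ["Admittedly", "although","besides", "but", "Even though", "However", "Otherwise"]
--     flag = False
--     for indicator in indicators:
--         if indicator.lower() in text.lower():
--             flag = True
--
--     if flag == True:
--         return 1
--     else:
--         return 0
-- ===== SOURCE B (Python) =====
-- def check_rebuttal_indicators(text):
--     # NFA-style single pass: walk the lowered text once, maintaining the list of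
--     # word suffixes still pending after a partial match; each character either
--     # advances a pending match, completes one, or starts new ones.
--     words = ["admittedly", "although", "besides", "but", "even though", "however", "otherwise"]
--     active = []
--     found = False
--     for ch in text.lower():
--         nxt = []
--         for w in active + words:
--             if w and w[0] == ch:
--                 rest = w[1:]
--                 if rest:
--                     nxt.append(rest)
--                 else:
--                     found = True
--         active = nxt
--     return 1 if found else 0
-- ===== Notes on version B (the rewrite author's own statement) =====
-- stated objective: alternative
-- what changed: B simulates an NFA over the lowered text in one character-at-a-time pass, maintaining a worklist of pending word suffixes (partial matches) and a found flag, instead of A's seven independent substring searches each re-lowercasing the text.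
import Mathlib
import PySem

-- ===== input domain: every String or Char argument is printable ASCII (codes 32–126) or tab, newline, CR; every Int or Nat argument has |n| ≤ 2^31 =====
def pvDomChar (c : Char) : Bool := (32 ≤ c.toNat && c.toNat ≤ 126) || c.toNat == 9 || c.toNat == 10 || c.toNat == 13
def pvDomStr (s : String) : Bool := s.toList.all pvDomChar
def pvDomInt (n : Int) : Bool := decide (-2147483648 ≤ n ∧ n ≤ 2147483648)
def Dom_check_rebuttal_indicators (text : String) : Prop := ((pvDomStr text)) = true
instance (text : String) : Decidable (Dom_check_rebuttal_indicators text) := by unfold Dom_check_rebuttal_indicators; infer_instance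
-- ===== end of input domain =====

-- B replaces A's seven independent substring searches (each re-lowercasing the text) by an
-- NFA-style single pass over the lowered text that maintains a worklist of pending word
-- suffixes (partial matches) plus a found flag; same return value (objective: alternative).

-- ===== PORT A =====
def check_rebuttal_indicators (text : String) : Int :=
  let indicators : List String :=
    ["Admittedly", "although", "besides", "but", "Even though", "However", "Otherwise"]
  let flag : Bool := indicators.foldl
    (fun flag indicator =>
      if PySem.Str.isIn (PySem.Str.lower indicator) (PySem.Str.lower text) then true else flag)
    false
  if flag = true then 1 else 0

-- ===== PORT B =====
-- the inner loop body: one candidate w from active ++ words, state = (nxt, found)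
def pvRebutInner (ch : Char) (st : List (List Char) × Bool) (w : List Char) :
    List (List Char) × Bool :=
  match w with
  | [] => st
  | c :: rest =>
    if c = ch then
      if rest = [] then (st.1, true) else (st.1 ++ [rest], st.2)
    else st

def pvRebutWords : List (List Char) :=
  ["admittedly", "although", "besides", "but", "even though", "however", "otherwise"].map
    String.toList

-- one character of the outer loop: nxt starts empty, found is carried
def pvRebutStep (st : List (List Char) × Bool) (ch : Char) : List (List Char) × Bool :=
  (st.1 ++ pvRebutWords).foldl (pvRebutInner ch) ([], st.2)

def check_rebuttal_indicators_alt (text : String) : Int :=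
  let res := (PySem.Chars.lower text.toList).foldl pvRebutStep ([], false)
  if res.2 then 1 else 0

-- ===== PRECONDITION & SPEC =====
def Spec_check_rebuttal_indicators (text : String) (out : Int) : Prop := out = check_rebuttal_indicators_alt text
instance (text : String) (out : Int) : Decidable (Spec_check_rebuttal_indicators text out) := by unfold Spec_check_rebuttal_indicators; infer_instance

-- ===== CLAIM =====
def Claim_equal_check_rebuttal_indicators : Prop := ∀ (text : String), Dom_check_rebuttal_indicators text → Spec_check_rebuttal_indicators text (check_rebuttal_indicators text)

-- ===== LEMMAS AND PROOFS =====

-- A's set-the-flag loop is Bool "any"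
theorem pvFoldlFlagEqAny {α : Type} (c : α → Bool) (l : List α) (b : Bool) :
    l.foldl (fun f a => if c a then true else f) b = (b || l.any c) := by
  induction l generalizing b with
  | nil => simp
  | cons x xs ih =>
    simp only [List.foldl_cons, List.any_cons, ih]
    cases c x <;> cases b <;> simp

-- the inner fold in closed form: appended suffixes + or-ed completion flag
theorem pvInnerSpec (ch : Char) (L : List (List Char)) (n0 : List (List Char)) (f0 : Bool) :
    L.foldl (pvRebutInner ch) (n0, f0) =
      (n0 ++ L.filterMap (fun w =>
          match w with
          | c :: rest => if c = ch ∧ rest ≠ [] then some rest else none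
          | [] => none),
       f0 || L.any (fun w => w == [ch])) := by
  induction L generalizing n0 f0 with
  | nil => simp
  | cons w L ih =>
    rw [List.foldl_cons, List.any_cons, List.filterMap_cons]
    cases w with
    | nil => simpa [pvRebutInner] using ih n0 f0
    | cons c rest =>
      by_cases hc : c = ch
      · by_cases hr : rest = []
        · rw [show pvRebutInner ch (n0, f0) (c :: rest) = (n0, true) from by
            simp [pvRebutInner, hc, hr], ih]
          simp [hc, hr]
        · rw [show pvRebutInner ch (n0, f0) (c :: rest) = (n0 ++ [rest], f0) from by
            simp [pvRebutInner, hc, hr], ih]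
          have hb2 : rest.isEmpty = false := by
            cases rest with
            | nil => exact absurd rfl hr
            | cons a l => rfl
          simp [hc, hr, hb2]
      · rw [show pvRebutInner ch (n0, f0) (c :: rest) = (n0, f0) from by
          simp [pvRebutInner, hc], ih]
        have hb : ((c :: rest : List Char) == [ch]) = false := by simp [hc]
        simp [hb, hc]

-- infix of l ++ [c] splits into infix of l or suffix ending at c
theorem pvInfixConcat (w l : List Char) (c : Char) :
    w <:+: l ++ [c] ↔ w <:+: l ∨ w <:+ l ++ [c] := by
  constructor
  · rintro ⟨s, t, h⟩
    rcases t.eq_nil_or_concat with rfl | ⟨t', d, rfl⟩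
    · right; exact ⟨s, by simpa using h⟩
    · left
      have h' : (s ++ w ++ t') ++ [d] = l ++ [c] := by simpa using h
      have := (List.append_inj' h' rfl).1
      exact ⟨s, t', this⟩
  · rintro (h | h)
    · exact h.trans ⟨[], [c], by simp⟩
    · exact h.isInfix

-- a nonempty suffix of l ++ [c] ends with c and its init is a suffix of l
theorem pvSuffixConcat (w l : List Char) (c : Char) (hw : w ≠ []) :
    w <:+ l ++ [c] ↔ ∃ w', w = w' ++ [c] ∧ w' <:+ l := by
  constructor
  · rintro ⟨s, h⟩
    rcases w.eq_nil_or_concat with rfl | ⟨w', d, rfl⟩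
    · exact absurd rfl hw
    · have h' : (s ++ w') ++ [d] = l ++ [c] := by simpa using h
      obtain ⟨h1, h2⟩ := List.append_inj' h' rfl
      have hd : d = c := by simpa using h2
      subst hd
      exact ⟨w', by simp, ⟨s, h1⟩⟩
  · rintro ⟨w', rfl, s, rfl⟩
    exact ⟨s, by simp⟩

-- the scan invariant: active = pending suffixes of partial matches, found = some word seen
theorem pvScanInv (p : List Char) :
    (∀ r, r ∈ (p.foldl pvRebutStep ([], false)).1 ↔
        (r ≠ [] ∧ ∃ w ∈ pvRebutWords, ∃ pre, pre ≠ [] ∧ pre ++ r = w ∧ pre <:+ p)) ∧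
    ((p.foldl pvRebutStep ([], false)).2 = true ↔ ∃ w ∈ pvRebutWords, w <:+: p) := by
  induction p using List.reverseRecOn with
  | nil =>
    constructor
    · intro r
      simp only [List.foldl_nil, List.not_mem_nil, false_iff]
      rintro ⟨-, w, hw, pre, hpre, -, hs⟩
      exact hpre (List.suffix_nil.mp hs)
    · simp only [List.foldl_nil]
      constructor
      · intro h; exact absurd h (by decide)
      · rintro ⟨w, hw, hinf⟩
        have : w = [] := List.infix_nil.mp hinf
        subst this
        exact absurd hw (by decide)
  | append_singleton q c ih =>
    obtain ⟨ihA, ihF⟩ := ih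
    rw [List.foldl_append]
    set st := q.foldl pvRebutStep ([], false) with hst
    simp only [List.foldl_cons, List.foldl_nil, pvRebutStep, pvInnerSpec]
    constructor
    · intro r
      simp only [List.nil_append, List.mem_filterMap, List.mem_append]
      constructor
      · rintro ⟨w, hw, hsome⟩
        cases w with
        | nil => simp at hsome
        | cons c0 rest =>
          have hsome2 : (if c0 = c ∧ rest ≠ [] then (some rest : Option (List Char))
              else none) = some r := hsome
          by_cases h : c0 = c ∧ rest ≠ []
          · obtain ⟨rfl, hr⟩ := h
            rw [if_pos ⟨rfl, hr⟩] at hsome2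
            injection hsome2 with hsome
            subst hsome
            refine ⟨hr, ?_⟩
            rcases hw with hact | hword
            · obtain ⟨hne, w', hw', pre, hpre, heq, hsuf⟩ := (ihA _).mp hact
              refine ⟨w', hw', pre ++ [c0], by simp, by simpa using heq, ?_⟩
              exact ((pvSuffixConcat _ q c0 (by simp)).mpr ⟨pre, rfl, hsuf⟩)
            · exact ⟨c0 :: rest, hword, [c0], by simp, by simp, ⟨q, rfl⟩⟩
          · simp [h] at hsome2
      · rintro ⟨hr, w, hw, pre, hpre, heq, hsuf⟩
        obtain ⟨pre', rfl, hsuf'⟩ := (pvSuffixConcat pre q c hpre).mp hsuf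
        rcases pre'.eq_nil_or_concat with rfl | hne'
        · -- match starts here: w = c :: r comes from words
          have hwcr : c :: r = w := by simpa using heq
          exact ⟨c :: r, Or.inr (by rw [hwcr]; exact hw), by simp [hr]⟩
        · -- extends a pending partial match (c :: r) ∈ active
          have hmem : (c :: r) ∈ st.1 := by
            refine (ihA _).mpr ⟨by simp, w, hw, pre', ?_, ?_, hsuf'⟩
            · rcases hne' with ⟨l', a, rfl⟩; simp
            · simpa using heq
          exact ⟨c :: r, Or.inl hmem, by simp [hr]⟩
    · simp only [Bool.or_eq_true, List.any_eq_true, List.mem_append, beq_iff_eq]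
      constructor
      · rintro (hf | hany)
        · obtain ⟨w, hw, hinf⟩ := ihF.mp hf
          exact ⟨w, hw, hinf.trans ⟨[], [c], by simp⟩⟩
        · obtain ⟨w, hmem, rfl⟩ := hany
          rcases hmem with hact | hword
          · obtain ⟨-, w', hw', pre, hpre, heq, hsuf⟩ := (ihA _).mp hact
            obtain ⟨s, rfl⟩ := hsuf
            refine ⟨w', hw', ?_⟩
            rw [← heq]
            exact List.IsSuffix.isInfix ⟨s, by simp⟩
          · exact ⟨[c], hword, List.IsSuffix.isInfix ⟨q, rfl⟩⟩
      · rintro ⟨w, hw, hinf⟩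
        rcases (pvInfixConcat w q c).mp hinf with hq | hsuf
        · exact Or.inl (ihF.mpr ⟨w, hw, hq⟩)
        · have hwne : w ≠ [] := by
            rintro rfl; revert hw; decide
          obtain ⟨w', rfl, hsuf'⟩ := (pvSuffixConcat w q c hwne).mp hsuf
          refine Or.inr ?_
          rcases w'.eq_nil_or_concat with rfl | ⟨l', a, rfl⟩
          · exact ⟨[c], Or.inr (by simpa using hw), rfl⟩
          · have hmem : ([c] : List Char) ∈ st.1 :=
              (ihA _).mpr ⟨by simp, _, hw, l' ++ [a], by simp, by simp, by simpa using hsuf'⟩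
            exact ⟨[c], Or.inl hmem, rfl⟩

-- ===== VERDICT =====
theorem check_rebuttal_indicators_spec : Claim_equal_check_rebuttal_indicators := by
  intro text _
  unfold Spec_check_rebuttal_indicators check_rebuttal_indicators check_rebuttal_indicators_alt
  simp only [pvFoldlFlagEqAny, Bool.false_or]
  obtain ⟨-, hF⟩ := pvScanInv (PySem.Chars.lower text.toList)
  have : (["Admittedly", "although", "besides", "but", "Even though", "However",
      "Otherwise"] : List String).any
        (fun indicator => PySem.Str.isIn (PySem.Str.lower indicator) (PySem.Str.lower text))
      = ((PySem.Chars.lower text.toList).foldl pvRebutStep ([], false)).2 := by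
    rw [Bool.eq_iff_iff, hF, List.any_eq_true]
    simp only [PySem.Str.isIn_eq, PySem.Str.toList_lower]
    constructor
    · rintro ⟨ind, hind, hin⟩
      refine ⟨PySem.Chars.lower ind.toList, ?_, (PySem.Chars.isIn_iff_infix _ _).mp hin⟩
      fin_cases hind <;> decide
    · rintro ⟨w, hw, hinf⟩
      fin_cases hw
      · exact ⟨"Admittedly", by simp, (PySem.Chars.isIn_iff_infix _ _).mpr (by exact hinf)⟩
      · exact ⟨"although", by simp, (PySem.Chars.isIn_iff_infix _ _).mpr (by exact hinf)⟩
      · exact ⟨"besides", by simp, (PySem.Chars.isIn_iff_infix _ _).mpr (by exact hinf)⟩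
      · exact ⟨"but", by simp, (PySem.Chars.isIn_iff_infix _ _).mpr (by exact hinf)⟩
      · exact ⟨"Even though", by simp, (PySem.Chars.isIn_iff_infix _ _).mpr (by exact hinf)⟩
      · exact ⟨"However", by simp, (PySem.Chars.isIn_iff_infix _ _).mpr (by exact hinf)⟩
      · exact ⟨"Otherwise", by simp, (PySem.Chars.isIn_iff_infix _ _).mpr (by exact hinf)⟩
  rw [this]
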